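-- pv_equiv track=rewrite | github.com/shubhampatel77/CS-6364-Artificial-Intelligence | Assignment 3/code/main.py | remove_redundant_literals
-- ===== SOURCE A (Python) =====
-- def remove_redundant_literals(clause):
--     freq = {l: 0 for l in clause}
--     for l in clause:
--         freq[l] += 1
--     for l in clause:
--         if l[0] == '~':
--             if l[1:] in freq:
--                 return []
--     return [l for i, l in enumerate(freq)]
-- ===== SOURCE B (Python) =====
-- def remove_redundant_literals(clause):
--     # Single pass: dedupe in order with a seen-set, and return [] the moment
--     # a literal's complement has already been seen (either orientation).
--     seen = set()
--     result = []
--     for l in clause: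
--         if ('~' + l) in seen or (l.startswith('~') and l[1:] in seen):
--             return []
--         if l not in seen:
--             seen.add(l)
--             result.append(l)
--     return result
-- ===== Notes on version B (the rewrite author's own statement) =====
-- stated objective: simpler
-- what changed: Replaces A's three passes (build a frequency dict, scan it for complementary literals, list the dict keys) by one pass that maintains a seen-set and an ordered result list, returning the empty clause as soon as a complementary pair is completed.
import Mathlib
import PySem

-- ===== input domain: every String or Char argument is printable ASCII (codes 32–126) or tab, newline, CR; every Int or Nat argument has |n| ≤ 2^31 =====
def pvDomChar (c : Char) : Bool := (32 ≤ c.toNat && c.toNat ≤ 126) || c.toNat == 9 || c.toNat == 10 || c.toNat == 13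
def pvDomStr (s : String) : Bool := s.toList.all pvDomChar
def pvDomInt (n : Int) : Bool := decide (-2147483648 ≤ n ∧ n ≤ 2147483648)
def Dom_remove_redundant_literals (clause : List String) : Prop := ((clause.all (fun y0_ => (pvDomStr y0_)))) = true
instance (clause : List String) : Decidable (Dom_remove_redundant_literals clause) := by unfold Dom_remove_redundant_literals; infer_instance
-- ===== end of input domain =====

-- B merges A's three passes (freq-dict build, complement scan, key listing) into one
-- seen-set pass; objective: simpler. Equal on clauses without the empty literal (Pre_).


-- ===== PORT A =====
-- the second loop of A: returns true iff Python A hits 'return []'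
-- (l[0] is PySem.Str.pyGet? l 0: the 'some'-comparison is false on "", where Python raises — excluded by Pre_;
--  l[1:] is ported by hand as String.ofList (l.toList.drop 1), exact for every string)
def pvCheckA (freq : PySem.Dict String Int) : List String → Bool
  | [] => false
  | l :: rest =>
    if PySem.Str.pyGet? l 0 = some '~' then
      if freq.contains (String.ofList (l.toList.drop 1)) then true
      else pvCheckA freq rest
    else pvCheckA freq rest

def remove_redundant_literals (clause : List String) : List String :=
  let freq0 : PySem.Dict String Int := clause.foldl (fun d l => d.insert l 0) PySem.Dict.empty
  let freq : PySem.Dict String Int := clause.foldl (fun d l => d.modify l 0 (· + 1)) freq0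
  if pvCheckA freq clause then []
  else (PySem.List.enumerate freq.keys).map (·.2)

-- ===== PORT B =====
-- Source B's single loop: seen-set + ordered result ('~' + l and l[1:] ported by hand on toList, exact)
def pvLoopB (seen : PySem.Set String) (result : List String) : List String → List String
  | [] => result
  | l :: rest =>
    if PySem.Set.contains seen (String.ofList ('~' :: l.toList)) ||
       (PySem.Str.startswith l "~" && PySem.Set.contains seen (String.ofList (l.toList.drop 1))) then
      []
    else if !(PySem.Set.contains seen l) then
      pvLoopB (PySem.Set.add seen l) (result ++ [l]) rest
    else
      pvLoopB seen result rest

def remove_redundant_literals_alt (clause : List String) : List String :=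
  pvLoopB PySem.Set.empty [] clause

-- ===== PRECONDITION & SPEC =====
-- Pre_ excludes exactly the clauses on which A raises IndexError at l[0]: those whose first
-- empty-string literal is not preceded by a literal that triggers A's complement return.
def Pre_remove_redundant_literals (clause : List String) : Prop :=
  ∀ i : Fin clause.length, clause.get i = "" →
    ∃ j : Fin clause.length, j.val < i.val ∧
      (clause.get j).toList.head? = some '~' ∧
      String.ofList ((clause.get j).toList.drop 1) ∈ clause
instance (clause : List String) : Decidable (Pre_remove_redundant_literals clause) := by
  unfold Pre_remove_redundant_literals; infer_instance

def pvWitness_remove_redundant_literals : List String := ["p", "~q", "p"]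

def Spec_remove_redundant_literals (clause : List String) (out : List String) : Prop := out = remove_redundant_literals_alt clause
instance (clause : List String) (out : List String) : Decidable (Spec_remove_redundant_literals clause out) := by unfold Spec_remove_redundant_literals; infer_instance

-- ===== CLAIM (what is proved, stated in full; the proofs are below) =====
def Claim_equal_remove_redundant_literals : Prop := ∀ (clause : List String), Dom_remove_redundant_literals clause → Pre_remove_redundant_literals clause → Spec_remove_redundant_literals clause (remove_redundant_literals clause)

-- ===== LEMMAS AND PROOFS =====

-- "clause contains a complementary pair" — the common core both programs decide
def pvHasPair (xs : List String) : Bool :=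
  xs.any (fun y => xs.any (fun x => y == String.ofList ('~' :: x.toList)))

lemma pvHasPair_iff (xs : List String) :
    pvHasPair xs = true ↔ ∃ y ∈ xs, ∃ x ∈ xs, y = String.ofList ('~' :: x.toList) := by
  simp [pvHasPair]

lemma pvHasPair_mono {xs ys : List String} (h : ∀ a ∈ xs, a ∈ ys) :
    pvHasPair xs = true → pvHasPair ys = true := by
  rw [pvHasPair_iff, pvHasPair_iff]
  rintro ⟨y, hy, x, hx, rfl⟩
  exact ⟨_, h _ hy, x, h _ hx, rfl⟩

lemma pvOfList_toList (s : String) : String.ofList s.toList = s :=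
  String.toList_inj.mp String.toList_ofList

lemma pvStartswith_tilde (l : String) :
    PySem.Str.startswith l "~" = true ↔ ∃ t, l.toList = '~' :: t := by
  rw [show PySem.Str.startswith l "~" = (['~'].isPrefixOf l.toList) from rfl]
  cases hl : l.toList with
  | nil => simp [List.isPrefixOf]
  | cons c t =>
      simp only [List.isPrefixOf, Bool.and_true, beq_iff_eq]
      constructor
      · intro h; exact ⟨t, by rw [← h]⟩
      · rintro ⟨t', ht'⟩
        injection ht' with h1 _
        exact h1.symm

lemma pvPyGet0 (l : String) : PySem.Str.pyGet? l 0 = l.toList.head? := by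
  rw [show PySem.Str.pyGet? l 0 = PySem.List.pyGet? l.toList 0 from rfl]
  cases l.toList <;> simp [PySem.List.pyGet?, PySem.List.pyIdx?]

lemma pvSetUpdate_self (s : PySem.Set String) (l : List String) (h : ∀ x ∈ l, x ∈ s) :
    PySem.Set.update s l = s := by
  induction l generalizing s with
  | nil => rfl
  | cons x t ih =>
      have hx : x ∈ s := h x (by simp)
      have : PySem.Set.add s x = s := by
        simp [PySem.Set.add, hx]
      show PySem.Set.update (PySem.Set.add s x) t = s
      rw [this]
      exact ih s (fun y hy => h y (by simp [hy]))

lemma pvKeysFreq (clause : List String) :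
    (clause.foldl (fun d l => d.modify l 0 (· + 1))
      (clause.foldl (fun d l => d.insert l (0 : Int)) PySem.Dict.empty)).keys
    = PySem.Set.ofList clause := by
  simp only [PySem.Dict.keys_foldl_modify, PySem.Dict.keys_foldl_insert, PySem.Dict.keys_empty]
  rw [show PySem.Set.update ([] : PySem.Set String) clause = PySem.Set.ofList clause from rfl]
  exact pvSetUpdate_self _ clause (fun x hx => (PySem.Set.mem_ofList clause x).mpr hx)

lemma pvCheckA_iff (freq : PySem.Dict String Int) (clause : List String)
    (hk : freq.keys = PySem.Set.ofList clause) (xs : List String) :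
    pvCheckA freq xs = true ↔
      ∃ y ∈ xs, (∃ t, y.toList = '~' :: t) ∧ String.ofList (y.toList.drop 1) ∈ clause := by
  have hc : ∀ k : String, freq.contains k = true ↔ k ∈ clause := by
    intro k
    rw [PySem.Dict.contains_eq_decide_mem_keys, hk]
    simp [PySem.Set.mem_ofList]
  induction xs with
  | nil => simp [pvCheckA]
  | cons l rest ih =>
      by_cases h0 : PySem.Str.pyGet? l 0 = some '~'
      · have hh : ∃ t, l.toList = '~' :: t := by
          rw [pvPyGet0] at h0
          cases hl : l.toList with
          | nil => simp [hl] at h0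
          | cons c t => rw [hl] at h0; simp at h0; exact ⟨t, by rw [h0]⟩
        by_cases h1 : freq.contains (String.ofList (l.toList.drop 1)) = true
        · simp only [pvCheckA]
          rw [if_pos h0, if_pos h1]
          constructor
          · intro _; exact ⟨l, by simp, hh, (hc _).mp h1⟩
          · intro _; rfl
        · simp only [pvCheckA]
          rw [if_pos h0, if_neg h1]
          constructor
          · intro h
            rcases ih.mp h with ⟨y, hy, hp⟩
            exact ⟨y, by simp [hy], hp⟩
          · rintro ⟨y, hy, hp⟩
            rcases List.mem_cons.mp hy with rfl | hy'
            · exact absurd ((hc _).mpr hp.2) h1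
            · exact ih.mpr ⟨y, hy', hp⟩
      · simp only [pvCheckA]
        rw [if_neg h0]
        constructor
        · intro h
          rcases ih.mp h with ⟨y, hy, hp⟩
          exact ⟨y, by simp [hy], hp⟩
        · rintro ⟨y, hy, hp⟩
          rcases List.mem_cons.mp hy with rfl | hy'
          · rcases hp.1 with ⟨t, ht⟩
            exact absurd (by rw [pvPyGet0, ht]; rfl) h0
          · exact ih.mpr ⟨y, hy', hp⟩

lemma pvCond_iff (clause : List String) :
    (∃ y ∈ clause, (∃ t, y.toList = '~' :: t) ∧ String.ofList (y.toList.drop 1) ∈ clause)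
    ↔ pvHasPair clause = true := by
  rw [pvHasPair_iff]
  constructor
  · rintro ⟨y, hy, ⟨t, ht⟩, hmem⟩
    refine ⟨y, hy, String.ofList (y.toList.drop 1), hmem, ?_⟩
    apply String.toList_inj.mp
    rw [String.toList_ofList, String.toList_ofList, ht]
    simp
  · rintro ⟨y, hy, x, hx, rfl⟩
    refine ⟨_, hy, ⟨x.toList, String.toList_ofList⟩, ?_⟩
    rw [String.toList_ofList]
    simpa [pvOfList_toList] using hx

lemma pvFire_eq (pre : List String) (l : String) (hpre : pvHasPair pre = false) :
    (PySem.Set.contains (PySem.Set.ofList pre) (String.ofList ('~' :: l.toList)) ||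
     (PySem.Str.startswith l "~" &&
      PySem.Set.contains (PySem.Set.ofList pre) (String.ofList (l.toList.drop 1))))
    = pvHasPair (pre ++ [l]) := by
  have hnp : ¬ ∃ y ∈ pre, ∃ x ∈ pre, y = String.ofList ('~' :: x.toList) := by
    rw [← pvHasPair_iff, hpre]; simp
  apply Bool.coe_iff_coe.mp
  simp only [Bool.or_eq_true, Bool.and_eq_true, PySem.Set.contains_eq_decide,
    decide_eq_true_eq, PySem.Set.mem_ofList, pvStartswith_tilde]
  rw [pvHasPair_iff]
  constructor
  · rintro (hmem | ⟨⟨t, ht⟩, hmem⟩)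
    · exact ⟨_, List.mem_append_left _ hmem, l, List.mem_append_right _ (by simp), rfl⟩
    · refine ⟨l, List.mem_append_right _ (by simp),
        String.ofList (l.toList.drop 1), List.mem_append_left _ hmem, ?_⟩
      apply String.toList_inj.mp
      rw [String.toList_ofList, String.toList_ofList, ht]
      simp
  · rintro ⟨y, hy, x, hx, rfl⟩
    rcases List.mem_append.mp hy with hy' | hy' <;>
      rcases List.mem_append.mp hx with hx' | hx'
    · exact absurd ⟨_, hy', x, hx', rfl⟩ hnp
    · left
      rw [List.mem_singleton] at hx'; subst hx'
      exact hy'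
    · right
      rw [List.mem_singleton] at hy'
      have hyl : x.toList = l.toList.drop 1 := by
        have : l.toList = '~' :: x.toList := by
          rw [← hy', String.toList_ofList]
        rw [this]; rfl
      refine ⟨⟨x.toList, by rw [← hy', String.toList_ofList]⟩, ?_⟩
      rw [← hyl, pvOfList_toList]
      exact hx'
    · rw [List.mem_singleton] at hy' hx'
      exfalso
      have hxx : x.toList = '~' :: x.toList := by
        conv_lhs => rw [hx', ← hy']
        rw [String.toList_ofList]
      have hlen := congrArg List.length hxx
      simp at hlen

lemma pvLoopB_spec (rest : List String) : ∀ pre : List String, pvHasPair pre = false →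
    pvLoopB (PySem.Set.ofList pre) (PySem.List.dedup pre) rest
    = if pvHasPair (pre ++ rest) = true then [] else PySem.List.dedup (pre ++ rest) := by
  induction rest with
  | nil => intro pre hpre; simp [pvLoopB, hpre]
  | cons l rest ih =>
      intro pre hpre
      rw [pvLoopB, pvFire_eq pre l hpre]
      by_cases hf : pvHasPair (pre ++ [l]) = true
      · have hmono : pvHasPair (pre ++ l :: rest) = true :=
          pvHasPair_mono (by intro a ha; simp at ha ⊢; tauto) hf
        simp only [hf, if_true, hmono]
      · have hf' : pvHasPair (pre ++ [l]) = false := by simpa using hf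
        have hofl : PySem.Set.ofList (pre ++ [l]) = PySem.Set.add (PySem.Set.ofList pre) l := by
          simp [PySem.Set.ofList_eq_foldl]
        rw [if_neg hf]
        by_cases hs : l ∈ pre
        · have hcs : PySem.Set.contains (PySem.Set.ofList pre) l = true := by
            rw [PySem.Set.contains_eq_decide]
            simp [PySem.Set.mem_ofList, hs]
          have h1 : PySem.Set.ofList (pre ++ [l]) = PySem.Set.ofList pre := by
            rw [hofl]; simp [PySem.Set.add, hs]
          have h2 : PySem.List.dedup (pre ++ [l]) = PySem.List.dedup pre := by
            simp only [PySem.List.dedup_eq_ofList]; exact h1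
          rw [hcs]
          simp only [Bool.not_true, Bool.false_eq_true, if_false]
          have h3 := ih (pre ++ [l]) hf'
          rw [h1, h2, List.append_assoc] at h3
          simpa using h3
        · have hcs : PySem.Set.contains (PySem.Set.ofList pre) l = false := by
            rw [PySem.Set.contains_eq_decide]
            simp [PySem.Set.mem_ofList, hs]
          have h1 : PySem.Set.add (PySem.Set.ofList pre) l = PySem.Set.ofList (pre ++ [l]) :=
            hofl.symm
          have h2 : PySem.List.dedup pre ++ [l] = PySem.List.dedup (pre ++ [l]) := by
            simp [PySem.List.dedup_eq_ofList, hofl, PySem.Set.add, hs]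
          rw [hcs]
          simp only [Bool.not_false, if_true]
          rw [h1, h2]
          have h3 := ih (pre ++ [l]) hf'
          rw [List.append_assoc] at h3
          simpa using h3

lemma pvA_char (clause : List String) :
    remove_redundant_literals clause
    = if pvHasPair clause = true then [] else PySem.List.dedup clause := by
  have hkeys := pvKeysFreq clause
  have hcheck : pvCheckA
      (clause.foldl (fun d l => d.modify l 0 (· + 1))
        (clause.foldl (fun d l => d.insert l (0 : Int)) PySem.Dict.empty)) clause
      = pvHasPair clause :=
    Bool.coe_iff_coe.mp ((pvCheckA_iff _ clause hkeys clause).trans (pvCond_iff clause))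
  show (if pvCheckA
      (clause.foldl (fun d l => d.modify l 0 (· + 1))
        (clause.foldl (fun d l => d.insert l (0 : Int)) PySem.Dict.empty)) clause then []
    else (PySem.List.enumerate
      (clause.foldl (fun d l => d.modify l 0 (· + 1))
        (clause.foldl (fun d l => d.insert l (0 : Int)) PySem.Dict.empty)).keys).map (·.2)) = _
  rw [hcheck, hkeys]
  simp [PySem.List.map_snd_enumerate, PySem.List.dedup_eq_ofList]

lemma pvB_char (clause : List String) :
    remove_redundant_literals_alt clause
    = if pvHasPair clause = true then [] else PySem.List.dedup clause := by
  have := pvLoopB_spec clause [] rfl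
  simpa [remove_redundant_literals_alt, PySem.Set.empty] using this

-- ===== VERDICT (by name: the statement is the Claim_ definition above) =====
theorem remove_redundant_literals_spec : Claim_equal_remove_redundant_literals := by
  intro clause _ _
  show remove_redundant_literals clause = remove_redundant_literals_alt clause
  rw [pvA_char, pvB_char]
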